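-- pv_equiv track=rewrite | github.com/LSBR29/CCLosSantos-11 | i_ciclo/ejercicios/pilas_colas/soluciones/colas_prioridad/s01.py | resta_numeros
-- ===== SOURCE A (Python) =====
-- def resta_numeros(numeros: list):
--     nums = numeros.copy()       # Copia para no modificar la original
--
--     while len(nums) > 1:
--         nums = sorted(nums, reverse=True)   # Ordenar de Mayor a Menor
--         a = nums.pop(0)     # Mayor
--         b = nums.pop(0)     # Mayor
--
--         diferencia = a - b
--
--         if diferencia > 0:
--             nums.append(diferencia)
--
--     return nums[0] if nums else 0
-- ===== SOURCE B (Python) =====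
-- def resta_numeros(numeros: list):
--     nums = sorted(numeros)
--     while len(nums) > 1:
--         a = nums.pop()
--         b = nums.pop()
--         d = a - b
--         if d > 0:
--             lo, hi = 0, len(nums)
--             while lo < hi:
--                 mid = (lo + hi) // 2
--                 if nums[mid] <= d:
--                     lo = mid + 1
--                 else:
--                     hi = mid
--             nums.insert(lo, d)
--     return nums[0] if nums else 0
-- ===== Notes on version B (the rewrite author's own statement) =====
-- stated objective: faster
-- what changed: B sorts once and then maintains the ascending order incrementally (pop the two largest from the end, binary-search the difference's slot and list.insert it) instead of A's full re-sort of the whole list on every loop iteration.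
import Mathlib
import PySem

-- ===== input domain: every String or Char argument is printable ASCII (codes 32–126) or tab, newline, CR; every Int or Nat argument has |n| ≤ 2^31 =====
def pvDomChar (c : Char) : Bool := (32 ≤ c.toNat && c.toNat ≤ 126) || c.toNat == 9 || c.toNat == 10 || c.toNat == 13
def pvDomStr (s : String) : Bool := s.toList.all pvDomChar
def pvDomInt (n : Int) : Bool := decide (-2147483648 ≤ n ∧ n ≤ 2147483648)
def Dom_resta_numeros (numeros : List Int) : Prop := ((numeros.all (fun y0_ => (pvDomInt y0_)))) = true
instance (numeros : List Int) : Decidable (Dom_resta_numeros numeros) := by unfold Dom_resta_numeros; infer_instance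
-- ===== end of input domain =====

-- B sorts once and maintains order incrementally (pop the two largest from the end,
-- binary-search the difference's slot and list.insert it) instead of A's full
-- re-sort of the list on every loop iteration.


-- ===== PORT A =====
-- while len(nums) > 1: sort descending, pop the two front elements, append a-b if > 0.
-- pop(0) on a list of length ≥ 2 is exactly head/tail twice (indices always in range).
-- fuel = initial length is a pure totality device: each iteration shortens the list,
-- so the loop exits (length ≤ 1) before fuel runs out.
def pvLoopA : Nat → List Int → Int
  | 0, nums => nums.headD 0
  | fuel + 1, nums =>
    if nums.length > 1 then
      let s := PySem.List.sorted nums (fun x => x) true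
      let a := s.headD 0
      let t := s.tail
      let b := t.headD 0
      let rest := t.tail
      let d := a - b
      pvLoopA fuel (if d > 0 then rest ++ [d] else rest)
    else nums.headD 0

def resta_numeros (numeros : List Int) : Int := pvLoopA numeros.length numeros

-- ===== PORT B =====
-- Source B's inner 'while lo < hi' bisection: lo and hi stay in [0, len], so the Nat
-- subtraction/division and nums.getD mid 0 are exact for the Python ints and nums[mid];
-- fuel = hi - lo shrinks every step, so fuel = len is a pure totality device.
def pvBis (nums : List Int) (d : Int) : Nat → Nat → Nat → Nat
  | 0, lo, _ => lo
  | f + 1, lo, hi =>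
    if lo < hi then
      let mid := (lo + hi) / 2
      if nums.getD mid 0 ≤ d then pvBis nums d f (mid + 1) hi
      else pvBis nums d f lo mid
    else lo

-- while len(nums) > 1: pop twice from the end, bisect + insert the difference if > 0
-- (fuel = initial length, same totality device as in port A)
def pvLoopB : Nat → List Int → Int
  | 0, nums => nums.headD 0
  | fuel + 1, nums =>
    if nums.length > 1 then
      let a := nums.getLastD 0
      let n1 := nums.dropLast
      let b := n1.getLastD 0
      let n2 := n1.dropLast
      let d := a - b
      pvLoopB fuel
        (if d > 0 then PySem.List.insert n2 ((pvBis n2 d n2.length 0 n2.length : Nat) : Int) d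
         else n2)
    else nums.headD 0

def resta_numeros_alt (numeros : List Int) : Int :=
  pvLoopB numeros.length (PySem.List.sorted numeros (fun x => x) false)

-- ===== PRECONDITION & SPEC =====
def Spec_resta_numeros (numeros : List Int) (out : Int) : Prop := out = resta_numeros_alt numeros
instance (numeros : List Int) (out : Int) : Decidable (Spec_resta_numeros numeros out) := by unfold Spec_resta_numeros; infer_instance

-- ===== CLAIM (what is proved, stated in full; the proofs are below) =====
def Claim_equal_resta_numeros : Prop := ∀ (numeros : List Int), Dom_resta_numeros numeros → Spec_resta_numeros numeros (resta_numeros numeros)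

-- ===== LEMMAS AND PROOFS =====

-- proof-side model of one sorted insertion: what bisect + insert produces
def pvIns (d : Int) : List Int → List Int
  | [] => [d]
  | x :: xs => if x ≤ d then x :: pvIns d xs else d :: x :: xs

theorem pvIns_perm (d : Int) (l : List Int) : (pvIns d l).Perm (d :: l) := by
  induction l with
  | nil => rfl
  | cons x xs ih =>
    simp only [pvIns]; split
    · exact ((ih.cons x).trans (List.Perm.swap d x xs))
    · exact List.Perm.refl _

theorem pvIns_pairwise (d : Int) (l : List Int) (h : l.Pairwise (· ≤ ·)) :
    (pvIns d l).Pairwise (· ≤ ·) := by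
  induction l with
  | nil => simp [pvIns]
  | cons x xs ih =>
    rcases List.pairwise_cons.mp h with ⟨hx, hxs⟩
    simp only [pvIns]; split
    · rename_i hxd
      refine List.pairwise_cons.mpr ⟨?_, ih hxs⟩
      intro y hy
      rcases List.mem_cons.mp ((pvIns_perm d xs).mem_iff.mp hy) with h1 | h1
      · subst h1; exact hxd
      · exact hx y h1
    · rename_i hxd
      refine List.pairwise_cons.mpr ⟨?_, h⟩
      intro y hy
      rcases List.mem_cons.mp hy with h1 | h1
      · subst h1; omega
      · exact le_trans (by omega) (hx y h1)

theorem sorted_getD_mono (l : List Int) (h : l.Pairwise (· ≤ ·)) (i j : Nat)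
    (hij : i ≤ j) (hj : j < l.length) : l.getD i 0 ≤ l.getD j 0 := by
  rcases Nat.lt_or_ge i j with hlt | hge
  · rw [l.getD_eq_getElem 0 (by omega), l.getD_eq_getElem 0 hj]
    exact (List.pairwise_iff_getElem.mp h) i j (by omega) hj hlt
  · have : i = j := by omega
    rw [this]

theorem bis_spec (l : List Int) (d : Int) (hpw : l.Pairwise (· ≤ ·)) :
    ∀ (f lo hi : Nat), lo ≤ hi → hi ≤ l.length → hi - lo ≤ f →
    (∀ i, i < lo → l.getD i 0 ≤ d) →
    (∀ i, hi ≤ i → i < l.length → d < l.getD i 0) →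
    pvBis l d f lo hi ≤ l.length ∧
    (∀ i, i < pvBis l d f lo hi → l.getD i 0 ≤ d) ∧
    (∀ i, pvBis l d f lo hi ≤ i → i < l.length → d < l.getD i 0) := by
  intro f
  induction f with
  | zero =>
    intro lo hi hlh hhl hf h1 h2
    have : lo = hi := by omega
    subst this
    exact ⟨by simpa [pvBis] using hhl, by simpa [pvBis] using h1, by simpa [pvBis] using h2⟩
  | succ f ih =>
    intro lo hi hlh hhl hf h1 h2
    rw [pvBis]
    by_cases hcond : lo < hi
    · rw [if_pos hcond]
      have hmid1 : lo ≤ (lo + hi) / 2 := by omega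
      have hmid2 : (lo + hi) / 2 < hi := by omega
      by_cases hle : l.getD ((lo + hi) / 2) 0 ≤ d
      · rw [if_pos hle]
        refine ih ((lo + hi) / 2 + 1) hi (by omega) hhl (by omega) ?_ h2
        intro i hi2
        exact le_trans (sorted_getD_mono l hpw i ((lo + hi) / 2) (by omega) (by omega)) hle
      · rw [if_neg hle]
        refine ih lo ((lo + hi) / 2) (by omega) (by omega) (by omega) h1 ?_
        intro i hi2 hil
        exact lt_of_lt_of_le (by omega)
          (sorted_getD_mono l hpw ((lo + hi) / 2) i hi2 hil)
    · rw [if_neg hcond]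
      have : lo = hi := by omega
      subst this
      exact ⟨by omega, h1, h2⟩

theorem pvIns_take_drop (d : Int) : ∀ (l : List Int) (p : Nat), p ≤ l.length →
    (∀ i, i < p → l.getD i 0 ≤ d) →
    (∀ i, p ≤ i → i < l.length → d < l.getD i 0) →
    pvIns d l = l.take p ++ d :: l.drop p := by
  intro l
  induction l with
  | nil =>
    intro p hp _ _
    have : p = 0 := by simpa using hp
    subst this; rfl
  | cons x xs ih =>
    intro p hp h1 h2
    match p with
    | 0 =>
      have hd : d < x := by simpa using h2 0 (by omega) (by simp)
      simp only [pvIns, if_neg (by omega : ¬ x ≤ d), List.take_zero, List.drop_zero,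
        List.nil_append]
    | q + 1 =>
      have hx : x ≤ d := by simpa using h1 0 (by omega)
      have := ih q (by simpa using hp)
        (fun i hi => by simpa using h1 (i + 1) (by omega))
        (fun i hqi hil => by simpa using h2 (i + 1) (by omega) (by simpa using hil))
      simp only [pvIns, if_pos hx, List.take_succ_cons, List.drop_succ_cons,
        List.cons_append, this]

theorem key_lemma : ∀ (fuel : Nat) (nums : List Int), nums.length ≤ fuel + 1 →
    pvLoopA fuel nums = pvLoopB fuel (PySem.List.sorted nums (fun x => x) false) := by
  intro fuel
  induction fuel with
  | zero =>
    intro nums hlen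
    rw [pvLoopA, pvLoopB]
    match nums, hlen with
    | [], _ => rfl
    | [x], _ => rw [PySem.List.sorted_eq_self_of_pairwise [x] (fun x => x) (by simp)]
  | succ fuel ih =>
    intro nums hlen
    by_cases h1 : nums.length > 1
    · -- s is the ascending sort; its reverse is A's descending sort
      set s := PySem.List.sorted nums (fun x => x) false with hs
      have hsl : s.length = nums.length := PySem.List.length_sorted ..
      have hsp : s.Perm nums := PySem.List.sorted_perm ..
      have hspw : s.Pairwise (· ≤ ·) := by
        simpa using PySem.List.sorted_pairwise nums (fun x => x)
      have hrev : PySem.List.sorted nums (fun x => x) true = s.reverse := by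
        refine List.Perm.eq_of_pairwise (le := fun a b : Int => b ≤ a)
          (fun a b _ _ hab hba => le_antisymm hba hab) ?_ ?_ ?_
        · simpa using PySem.List.sorted_pairwise_rev nums (fun x => x)
        · exact (List.pairwise_reverse).mpr (by simpa using hspw)
        · exact (PySem.List.sorted_perm ..).trans (hsp.symm.trans s.reverse_perm.symm)
      obtain ⟨a, b, rest, hshape⟩ :
          ∃ a b rest, s.reverse = a :: b :: rest := by
        match hm : s.reverse with
        | [] =>
          exfalso
          have h0 : s.length = 0 := by simpa using congrArg List.length hm
          omega
        | [x] =>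
          exfalso
          have h0 : s.length = 1 := by simpa using congrArg List.length hm
          omega
        | x :: y :: r => exact ⟨x, y, r, rfl⟩
      have hsrev : s = rest.reverse ++ [b, a] := by
        have := congrArg List.reverse hshape
        simpa using this
      -- A's step
      have hA : pvLoopA (fuel + 1) nums =
          pvLoopA fuel (if a - b > 0 then rest ++ [a - b] else rest) := by
        rw [pvLoopA]; simp only [h1, if_true]
        rw [hrev, hshape]; simp
      -- the remaining prefix, reversed, is sorted ascending
      have hrestpw : rest.reverse.Pairwise (· ≤ ·) := by
        have h2 : (b :: rest).Pairwise (fun a b : Int => b ≤ a) := by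
          have h3 := (List.pairwise_reverse).mpr (by simpa using hspw)
          rw [hshape] at h3
          exact (List.pairwise_cons.mp h3).2
        exact (List.pairwise_reverse).mpr (List.pairwise_cons.mp h2).2
      -- B's bisection + insert is exactly the sorted insertion pvIns
      have hbis : PySem.List.insert rest.reverse
          ((pvBis rest.reverse (a - b) rest.reverse.length 0 rest.reverse.length : Nat) : Int)
          (a - b) = pvIns (a - b) rest.reverse := by
        obtain ⟨hp, hlow, hhigh⟩ := bis_spec rest.reverse (a - b) hrestpw
          rest.reverse.length 0 rest.reverse.length (by omega) (by omega) (by omega)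
          (by omega) (by omega)
        rw [PySem.List.insert_natCast _ _ _ hp]
        exact (pvIns_take_drop (a - b) rest.reverse _ hp hlow hhigh).symm
      -- B's step
      have hgl : s.getLastD 0 = a := by rw [hsrev]; simp
      have hdl : s.dropLast = rest.reverse ++ [b] := by
        rw [hsrev, show rest.reverse ++ [b, a] = (rest.reverse ++ [b]) ++ [a] by simp]
        simp
      have hB : pvLoopB (fuel + 1) s =
          pvLoopB fuel (if a - b > 0 then pvIns (a - b) rest.reverse else rest.reverse) := by
        rw [pvLoopB]
        simp only [hsl, h1, if_true]
        rw [hgl, hdl]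
        simp only [List.dropLast_concat, List.getLastD_concat]
        rw [hbis]
      have hrlen : rest.length + 2 = nums.length := by
        have := congrArg List.length hshape; simp at this; omega
      -- B's next state is exactly the ascending sort of A's next state
      have hnext : PySem.List.sorted (if a - b > 0 then rest ++ [a - b] else rest)
          (fun x => x) false
          = (if a - b > 0 then pvIns (a - b) rest.reverse else rest.reverse) := by
        split
        · refine PySem.List.sorted_id_eq_of_perm_of_pairwise _ _ ?_ (pvIns_pairwise _ _ hrestpw)
          refine ((pvIns_perm _ _).trans ?_)
          refine ((List.Perm.cons _ rest.reverse_perm).trans ?_)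
          simpa using (List.perm_append_comm (l₁ := [a - b]) (l₂ := rest))
        · exact PySem.List.sorted_id_eq_of_perm_of_pairwise _ _ rest.reverse_perm hrestpw
      rw [hA, hB, ← hnext]
      refine ih (if a - b > 0 then rest ++ [a - b] else rest) ?_
      split
      · simp only [List.length_append, List.length_cons, List.length_nil]; omega
      · omega
    · -- length ≤ 1: both sides return the head (or 0)
      rw [pvLoopA, pvLoopB]
      have hsl : (PySem.List.sorted nums (fun x => x) false).length = nums.length :=
        PySem.List.length_sorted ..
      rw [if_neg h1, if_neg (by omega)]
      match nums with
      | [] => rfl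
      | [x] =>
        rw [PySem.List.sorted_eq_self_of_pairwise [x] (fun x => x) (by simp)]
      | x :: y :: r => simp at h1

-- ===== VERDICT (by name: the statement is the Claim_ definition above) =====
theorem resta_numeros_spec : Claim_equal_resta_numeros := by
  intro numeros _
  unfold Spec_resta_numeros resta_numeros resta_numeros_alt
  exact key_lemma numeros.length numeros (by omega)
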